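-- pv_equiv track=rewrite | github.com/noeticanlabs/cnsc-haai | src/cnsc_haai/tasks/gridworld_env.py | create_gridworld
-- ===== SOURCE A (Python) =====
-- from typing import Tuple, List, Optional
--
-- CELL_EMPTY = 0
--
-- CELL_WALL = 1
--
-- CELL_HAZARD = 2
--
-- def create_gridworld(
--     width: int,
--     height: int,
--     walls: List[Tuple[int, int]],
--     hazards: List[Tuple[int, int]],
-- ) -> Tuple[Tuple[int, ...], ...]:
--     """
--     Create a gridworld map.
--
--     Args:
--         width: Grid width
--         height: Grid height
--         walls: List of wall positions
--         hazards: List of hazard positions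
--
--     Returns:
--         Immutable grid tuple
--     """
--     grid = [[CELL_EMPTY for _ in range(width)] for _ in range(height)]
--
--     for x, y in walls:
--         if 0 <= x < width and 0 <= y < height:
--             grid[y][x] = CELL_WALL
--
--     for x, y in hazards:
--         if 0 <= x < width and 0 <= y < height:
--             grid[y][x] = CELL_HAZARD
--
--     return tuple(tuple(row) for row in grid)
-- ===== SOURCE B (Python) =====
-- CELL_EMPTY = 0
-- CELL_WALL = 1
-- CELL_HAZARD = 2
--
-- def create_gridworld(width, height, walls, hazards):
--     wall_set = set(walls)
--     hazard_set = set(hazards)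
--     return tuple(
--         tuple(
--             CELL_HAZARD if (x, y) in hazard_set
--             else CELL_WALL if (x, y) in wall_set
--             else CELL_EMPTY
--             for x in range(width)
--         )
--         for y in range(height)
--     )
-- ===== Notes on version B (the rewrite author's own statement) =====
-- stated objective: idiomatic
-- what changed: Replaces create-then-two-mutation-passes with a single nested comprehension that decides each cell's value (hazard first, then wall, then empty) by lookup in sets built once from the coordinate lists.
import Mathlib
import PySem

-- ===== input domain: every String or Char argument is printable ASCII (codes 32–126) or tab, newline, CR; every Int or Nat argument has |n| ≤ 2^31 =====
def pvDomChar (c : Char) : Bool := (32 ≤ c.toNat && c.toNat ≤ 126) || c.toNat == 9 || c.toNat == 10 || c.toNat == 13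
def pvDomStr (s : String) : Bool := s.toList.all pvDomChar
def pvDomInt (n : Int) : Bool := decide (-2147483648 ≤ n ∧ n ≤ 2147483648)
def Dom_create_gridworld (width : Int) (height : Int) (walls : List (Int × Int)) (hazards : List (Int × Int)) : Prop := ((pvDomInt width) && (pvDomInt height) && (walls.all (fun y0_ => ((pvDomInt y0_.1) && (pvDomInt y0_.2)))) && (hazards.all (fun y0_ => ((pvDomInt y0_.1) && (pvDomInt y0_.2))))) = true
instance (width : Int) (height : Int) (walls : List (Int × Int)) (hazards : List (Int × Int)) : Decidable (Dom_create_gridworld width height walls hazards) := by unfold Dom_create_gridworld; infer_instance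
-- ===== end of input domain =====

-- B builds the grid in one nested comprehension with set lookups (hazard before wall)
-- instead of A's create-then-two-mutation-passes; same return value on all inputs.

-- ===== PORT A =====
-- A: build grid of zeros, mutate wall cells to 1, then hazard cells to 2.
-- range(height)/range(width): .toNat clamps negatives to 0, exactly Python's empty range.
def create_gridworld (width : Int) (height : Int) (walls : List (Int × Int)) (hazards : List (Int × Int)) : List (List Int) :=
  hazards.foldl (fun g p =>
      if 0 ≤ p.1 ∧ p.1 < width ∧ 0 ≤ p.2 ∧ p.2 < height then
        g.modify p.2.toNat (fun row => row.set p.1.toNat 2)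
      else g)
    (walls.foldl (fun g p =>
        if 0 ≤ p.1 ∧ p.1 < width ∧ 0 ≤ p.2 ∧ p.2 < height then
          g.modify p.2.toNat (fun row => row.set p.1.toNat 1)
        else g)
      ((List.range height.toNat).map (fun _ => (List.range width.toNat).map (fun _ => (0 : Int)))))

-- ===== PORT B =====
-- B: sets built once, then one nested comprehension deciding each cell.
def create_gridworld_alt (width : Int) (height : Int) (walls : List (Int × Int)) (hazards : List (Int × Int)) : List (List Int) :=
  (List.range height.toNat).map (fun (y : Nat) =>
    (List.range width.toNat).map (fun (x : Nat) =>
      if PySem.Set.contains (PySem.Set.ofList hazards) ((x : Int), (y : Int)) then (2 : Int)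
      else if PySem.Set.contains (PySem.Set.ofList walls) ((x : Int), (y : Int)) then 1
      else 0))

-- ===== PRECONDITION & SPEC =====
def Spec_create_gridworld (width : Int) (height : Int) (walls : List (Int × Int)) (hazards : List (Int × Int)) (out : List (List Int)) : Prop := out = create_gridworld_alt width height walls hazards
instance (width : Int) (height : Int) (walls : List (Int × Int)) (hazards : List (Int × Int)) (out : List (List Int)) : Decidable (Spec_create_gridworld width height walls hazards out) := by unfold Spec_create_gridworld; infer_instance

-- ===== CLAIM (what is proved, stated in full; the proofs are below) =====
def Claim_equal_create_gridworld : Prop := ∀ (width : Int) (height : Int) (walls : List (Int × Int)) (hazards : List (Int × Int)), Dom_create_gridworld width height walls hazards → Spec_create_gridworld width height walls hazards (create_gridworld width height walls hazards)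

-- ===== LEMMAS AND PROOFS =====

/-- The grid whose cell (x, y) holds `F x y`. -/
def gridOf (width height : Int) (F : Nat → Nat → Int) : List (List Int) :=
  (List.range height.toNat).map (fun y => (List.range width.toNat).map (fun x => F x y))

theorem gridOf_congr {width height : Int} {F G : Nat → Nat → Int}
    (h : ∀ x y, x < width.toNat → y < height.toNat → F x y = G x y) :
    gridOf width height F = gridOf width height G := by
  unfold gridOf
  refine List.map_congr_left (fun y hy => ?_)
  refine List.map_congr_left (fun x hx => ?_)
  exact h x y (List.mem_range.mp hx) (List.mem_range.mp hy)

theorem set_map_range {n x0 : Nat} (g : Nat → Int) (v : Int) :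
    ((List.range n).map g).set x0 v
      = (List.range n).map (fun j => if j = x0 then v else g j) := by
  apply List.ext_getElem
  · simp
  · intro i h1 h2
    simp only [List.getElem_set, List.getElem_map, List.getElem_range]
    by_cases h : x0 = i
    · simp [h]
    · rw [if_neg h, if_neg (fun hh => h hh.symm)]

theorem modify_gridOf {width height : Int} (F : Nat → Nat → Int) (p : Int × Int) (c : Int)
    (hx : 0 ≤ p.1) (hy : 0 ≤ p.2) :
    (gridOf width height F).modify p.2.toNat (fun row => row.set p.1.toNat c)
      = gridOf width height (fun x y => if ((x : Int), (y : Int)) = p then c else F x y) := by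
  unfold gridOf
  apply List.ext_getElem
  · simp
  · intro y h1 h2
    simp only [List.getElem_modify, List.getElem_map, List.getElem_range]
    by_cases hyy : p.2.toNat = y
    · simp only [hyy, set_map_range]
      refine List.map_congr_left (fun x hx' => ?_)
      have : ((x : Int), (y : Int)) = p ↔ x = p.1.toNat := by
        rw [Prod.ext_iff]
        constructor
        · rintro ⟨h1, h2⟩; omega
        · rintro rfl
          refine ⟨?_, ?_⟩ <;> simp <;> omega
      simp [this]
    · rw [if_neg hyy]
      refine List.map_congr_left (fun x hx' => ?_)
      have : ¬ ((x : Int), (y : Int)) = p := by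
        rw [Prod.ext_iff]; rintro ⟨h1, h2⟩; omega
      simp [this]

/-- One marking pass of A, characterised pointwise inside the grid. -/
theorem mark_foldl {width height : Int} (c : Int) :
    ∀ (ps : List (Int × Int)) (F : Nat → Nat → Int),
    ps.foldl (fun g p =>
        if 0 ≤ p.1 ∧ p.1 < width ∧ 0 ≤ p.2 ∧ p.2 < height then
          g.modify p.2.toNat (fun row => row.set p.1.toNat c)
        else g) (gridOf width height F)
      = gridOf width height (fun x y => if ((x : Int), (y : Int)) ∈ ps then c else F x y) := by
  intro ps
  induction ps with
  | nil => intro F; simp [gridOf]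
  | cons p ps ih =>
    intro F
    simp only [List.foldl_cons]
    by_cases hp : 0 ≤ p.1 ∧ p.1 < width ∧ 0 ≤ p.2 ∧ p.2 < height
    · rw [if_pos hp, modify_gridOf F p c hp.1 hp.2.2.1, ih]
      refine gridOf_congr (fun x y _ _ => ?_)
      by_cases hm : ((x : Int), (y : Int)) ∈ ps
      · simp [hm]
      · by_cases he : ((x : Int), (y : Int)) = p <;> simp [hm, he]
    · rw [if_neg hp, ih]
      refine gridOf_congr (fun x y hxw hyh => ?_)
      have hne : ¬ ((x : Int), (y : Int)) = p := by
        rw [Prod.ext_iff]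
        rintro ⟨h1, h2⟩
        exact hp ⟨by omega, by omega, by omega, by omega⟩
      simp [hne]

-- ===== VERDICT (by name: the statement is the Claim_ definition above) =====
theorem create_gridworld_spec : Claim_equal_create_gridworld := by
  intro width height walls hazards _
  show create_gridworld width height walls hazards = create_gridworld_alt width height walls hazards
  unfold create_gridworld create_gridworld_alt
  have hinit : (List.range height.toNat).map (fun _ => (List.range width.toNat).map (fun _ => (0 : Int)))
      = gridOf width height (fun _ _ => 0) := rfl
  rw [hinit, mark_foldl (width := width) (height := height) 1 walls,
    mark_foldl (width := width) (height := height) 2 hazards]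
  unfold gridOf
  refine List.map_congr_left (fun y _ => ?_)
  refine List.map_congr_left (fun x _ => ?_)
  by_cases hh : ((x : Int), (y : Int)) ∈ hazards <;>
    by_cases hw : ((x : Int), (y : Int)) ∈ walls <;>
      simp [hh, hw, PySem.Set.mem_ofList]
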